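-- pv_equiv track=rewrite | github.com/rafaellucas3/advent_of_code_2023 | solutions/day_01/part_2/day1_solution.py | search
-- ===== SOURCE A (Python) =====
-- def parse_string(search_result):
--     """Parse a string and return the parsed string."""
--     result = ""
--     for key, value in search_result:
--         result += value
--     return result
--
-- def search(string, search_dict):
--     """Search a string for a key in a dictionary recursevelly and return the index of the key and the value."""
--     search_result = []
--     for key, value in search_dict.items():
--         string_copy = string
--         cut_char = 0
--         index = string_copy.find(key)
--         while index != -1:
--             search_result.append((cut_char + index, value))
--             cut_char += len(string_copy[0:index+len(key)])
--             string_copy = string_copy[index+len(key):len(string_copy)]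
--             index = string_copy.find(key)
--
--     search_result.sort(key=lambda x: x[0])
--
--     return parse_string(search_result)
-- ===== SOURCE B (Python) =====
-- def search(string, search_dict):
--     """One left-to-right positional pass: at each index try every key (dict order),
--     with a per-key next-allowed cursor giving the same non-overlapping matches."""
--     next_allowed = {}
--     result = ""
--     for i in range(len(string)):
--         for key, value in search_dict.items():
--             if next_allowed.get(key, 0) <= i and string[i:i+len(key)] == key:
--                 result += value
--                 next_allowed[key] = i + len(key)
--     return result
-- ===== Notes on version B (the rewrite author's own statement) =====
-- stated objective: alternative
-- what changed: Instead of scanning the string once per key with find/slice, collecting (position, value) pairs and stable-sorting them by position, B makes a single left-to-right pass over positions, trying every key at each index with a per-key next-allowed cursor, so the values are emitted already in order and no sort or slicing is needed.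
-- outside the precondition, e.g. on search('ab', {'': 'X'}): A does not finish within the time limit, B returns 'XX'
import Mathlib
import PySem

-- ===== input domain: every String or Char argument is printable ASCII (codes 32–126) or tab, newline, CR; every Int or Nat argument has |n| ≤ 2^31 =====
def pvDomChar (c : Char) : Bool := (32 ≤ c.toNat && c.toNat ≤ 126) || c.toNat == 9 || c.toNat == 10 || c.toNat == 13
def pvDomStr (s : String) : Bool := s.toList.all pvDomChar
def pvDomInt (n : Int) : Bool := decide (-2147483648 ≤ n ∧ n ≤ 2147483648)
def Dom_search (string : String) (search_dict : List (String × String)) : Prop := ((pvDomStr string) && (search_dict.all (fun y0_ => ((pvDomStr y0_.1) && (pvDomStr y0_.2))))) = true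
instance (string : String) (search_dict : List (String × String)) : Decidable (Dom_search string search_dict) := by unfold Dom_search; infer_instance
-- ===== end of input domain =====

-- B replaces A's per-key find/slice scans plus a stable sort by one left-to-right positional
-- pass with per-key cursors (alternative decomposition, no sort; no speed claim).

-- ===== PORT A =====
def parse_string (search_result : List (Int × String)) : String :=
  search_result.foldl (fun result kv => result ++ kv.2) ""

-- the while-loop of A for one (key, value); fuel is a loop bound (each iteration shortens
-- string_copy by at least one character when key ≠ "", which Pre_search guarantees)
def searchWhile (key value : String) (fuel : Nat) (string_copy : String) (cut_char : Int)
    (search_result : List (Int × String)) : List (Int × String) :=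
  match fuel with
  | 0 => search_result
  | fuel + 1 =>
    let index := PySem.Str.find string_copy key
    if index = -1 then search_result
    else
      searchWhile key value fuel
        (PySem.Str.slice string_copy (some (index + PySem.Str.len key)) (some (PySem.Str.len string_copy)))
        (cut_char + PySem.Str.len (PySem.Str.slice string_copy (some 0) (some (index + PySem.Str.len key))))
        (search_result ++ [(cut_char + index, value)])

def search (string : String) (search_dict : List (String × String)) : String :=
  let search_result := search_dict.foldl
    (fun search_result kv => searchWhile kv.1 kv.2 (string.toList.length + 1) string 0 search_result) []
  parse_string (PySem.List.sorted search_result (fun x => x.1) false)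

-- ===== PORT B =====
def search_alt (string : String) (search_dict : List (String × String)) : String :=
  ((PySem.List.pyRange 0 (PySem.Str.len string) 1).foldl
    (fun (st : PySem.Dict String Int × String) i =>
      search_dict.foldl
        (fun (st : PySem.Dict String Int × String) kv =>
          if st.1.getD kv.1 0 ≤ i ∧ PySem.Str.slice string (some i) (some (i + PySem.Str.len kv.1)) = kv.1 then
            (st.1.insert kv.1 (i + PySem.Str.len kv.1), st.2 ++ kv.2)
          else st)
        st)
    (PySem.Dict.empty, "")).2

-- ===== PRECONDITION & SPEC =====
-- Pre_search excludes dicts with an empty-string key (A's while loop then never terminates) and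
-- association lists whose keys repeat (a Python dict cannot hold duplicate keys, so such lists
-- denote no Python input; the two ports thread them differently).
def Pre_search (string : String) (search_dict : List (String × String)) : Prop :=
  (∀ kv ∈ search_dict, kv.1 ≠ "") ∧ (search_dict.map (·.1)).Nodup
instance (string : String) (search_dict : List (String × String)) : Decidable (Pre_search string search_dict) := by
  unfold Pre_search; infer_instance

def pvWitness_search : String × (List (String × String)) :=
  ("twone1two", [("one", "1"), ("two", "2")])

def Spec_search (string : String) (search_dict : List (String × String)) (out : String) : Prop := out = search_alt string search_dict
instance (string : String) (search_dict : List (String × String)) (out : String) : Decidable (Spec_search string search_dict out) := by unfold Spec_search; infer_instance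

-- ===== CLAIM (what is proved, stated in full; the proofs are below) =====
def Claim_equal_search : Prop := ∀ (string : String) (search_dict : List (String × String)), Dom_search string search_dict → Pre_search string search_dict → Spec_search string search_dict (search string search_dict)

-- ===== LEMMAS AND PROOFS =====

def J (s k : List Char) : Nat → Nat → List Nat
  | 0, _ => []
  | fuel + 1, c =>
    let f := PySem.Chars.find (s.drop c) k
    if f = -1 then [] else (c + f.toNat) :: J s k fuel (c + f.toNat + k.length)

def Jc (s k : List Char) (c : Nat) : List Nat := J s k (s.length + 1) c


theorem J_step (s k : List Char) (fuel c : Nat) :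
    J s k (fuel + 1) c = (if PySem.Chars.find (s.drop c) k = -1 then []
      else (c + (PySem.Chars.find (s.drop c) k).toNat) ::
        J s k fuel (c + (PySem.Chars.find (s.drop c) k).toNat + k.length)) := rfl

theorem drop_cast (s k : List Char) {x y : Nat} (h : x = y) (hp : k <+: s.drop x) :
    k <+: s.drop y := h ▸ hp

theorem dd (s : List Char) (a b : Nat) : (s.drop a).drop b = s.drop (a + b) := by
  rw [List.drop_drop]

theorem find_nil_of_ne (s k : List Char) (hk : k ≠ []) (c : Nat) (h : s.length ≤ c) :
    PySem.Chars.find (s.drop c) k = -1 := by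
  rw [List.drop_eq_nil_of_le h, PySem.Chars.find_eq_neg_one_iff]
  intro hinf
  exact hk (List.eq_nil_of_infix_nil hinf)

theorem find_head_facts (s k : List Char) (hk : k ≠ []) (c : Nat)
    (h : PySem.Chars.find (s.drop c) k ≠ -1) :
    0 ≤ PySem.Chars.find (s.drop c) k ∧
    k <+: s.drop (c + (PySem.Chars.find (s.drop c) k).toNat) ∧
    c + (PySem.Chars.find (s.drop c) k).toNat + k.length ≤ s.length := by
  have hnn : 0 ≤ PySem.Chars.find (s.drop c) k := by
    have := PySem.Chars.neg_one_le_find (s.drop c) k; omega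
  obtain ⟨hp, -⟩ := PySem.Chars.find_spec hnn
  rw [dd] at hp
  have hlen : k.length ≤ (s.drop (c + (PySem.Chars.find (s.drop c) k).toNat)).length :=
    hp.length_le
  rw [List.length_drop] at hlen
  have hkl : 1 ≤ k.length := by
    cases k with
    | nil => exact absurd rfl hk
    | cons a t => simp
  exact ⟨hnn, hp, by omega⟩

theorem J_mem_bounds (s k : List Char) (hk : k ≠ []) :
    ∀ fuel c p, p ∈ J s k fuel c → c ≤ p ∧ p + k.length ≤ s.length ∧ k <+: s.drop p := by
  intro fuel
  induction fuel with
  | zero => intro c p hp; simp [J] at hp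
  | succ fuel ih =>
    intro c p hp
    simp only [J] at hp
    split_ifs at hp with h
    · simp at hp
    · obtain ⟨hnn, hpre, hle⟩ := find_head_facts s k hk c h
      rcases List.mem_cons.mp hp with rfl | hp'
      · exact ⟨Nat.le_add_right _ _, by omega, hpre⟩
      · obtain ⟨h1, h2, h3⟩ := ih _ _ hp'
        exact ⟨by omega, h2, h3⟩

theorem J_pairwise (s k : List Char) (hk : k ≠ []) :
    ∀ fuel c, (J s k fuel c).Pairwise (· < ·) := by
  intro fuel
  induction fuel with
  | zero => intro c; simp [J]
  | succ fuel ih =>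
    intro c
    simp only [J]
    split_ifs with h
    · simp
    · refine List.Pairwise.cons ?_ (ih _)
      intro p hp
      have hkl : 1 ≤ k.length := by
        cases k with
        | nil => exact absurd rfl hk
        | cons a t => simp
      have := (J_mem_bounds s k hk fuel _ p hp).1
      omega

theorem J_succ_fuel (s k : List Char) (hk : k ≠ []) :
    ∀ fuel c, s.length ≤ c + fuel → J s k (fuel + 1) c = J s k fuel c := by
  intro fuel
  induction fuel with
  | zero =>
    intro c h
    simp only [J, find_nil_of_ne s k hk c (by omega)]
    simp
  | succ fuel ih =>
    intro c h
    rw [J_step s k (fuel + 1) c, J_step s k fuel c]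
    split_ifs with hf
    · rfl
    · obtain ⟨hnn, -, -⟩ := find_head_facts s k hk c hf
      have hkl : 1 ≤ k.length := by
        cases k with
        | nil => exact absurd rfl hk
        | cons a t => simp
      rw [ih _ (by omega)]

theorem Jc_unfold (s k : List Char) (hk : k ≠ []) (c : Nat) :
    Jc s k c = (let f := PySem.Chars.find (s.drop c) k
      if f = -1 then [] else (c + f.toNat) :: Jc s k (c + f.toNat + k.length)) := by
  unfold Jc
  rw [J_step s k s.length c]
  simp only []
  split_ifs with hf
  · rfl
  · obtain ⟨hnn, -, hle⟩ := find_head_facts s k hk c hf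
    have hkl : 1 ≤ k.length := by
      cases k with
      | nil => exact absurd rfl hk
      | cons a t => simp
    congr 1
    rw [J_succ_fuel s k hk s.length _ (by omega)]

theorem Jc_nil_of_ge (s k : List Char) (hk : k ≠ []) (c : Nat) (h : s.length ≤ c) :
    Jc s k c = [] := by
  unfold Jc
  simp only [J, find_nil_of_ne s k hk c h]
  simp

theorem find_first_unique (s k : List Char) (j : Nat) (hp : k <+: s.drop j)
    (hmin : ∀ i < j, ¬ k <+: s.drop i) : PySem.Chars.find s k = (j : Int) := by
  have hinf : k <:+: s := by
    rcases hp with ⟨t, ht⟩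
    exact ⟨s.take j, t, by rw [List.append_assoc, ht, List.take_append_drop]⟩
  have hnn : 0 ≤ PySem.Chars.find s k := (PySem.Chars.find_nonneg_iff s k).mpr hinf
  obtain ⟨hp', hmin'⟩ := PySem.Chars.find_spec hnn
  have : (PySem.Chars.find s k).toNat = j := by
    rcases Nat.lt_trichotomy (PySem.Chars.find s k).toNat j with h | h | h
    · exact absurd hp' (hmin _ h)
    · exact h
    · exact absurd hp (hmin' _ h)
  omega
theorem find_drop_succ (s k : List Char) (i : Nat) (hm : ¬ k <+: s.drop i) :
    PySem.Chars.find (s.drop i) k =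
      (if PySem.Chars.find (s.drop (i+1)) k = -1 then -1 else 1 + PySem.Chars.find (s.drop (i+1)) k) := by
  have dd : ∀ a b : Nat, (s.drop a).drop b = s.drop (a + b) := by
    intro a b; rw [List.drop_drop]
  split_ifs with h
  · rw [PySem.Chars.find_eq_neg_one_iff] at h ⊢
    intro hinf
    rcases (PySem.Chars.exists_prefix_drop_iff_isIn k (s.drop i)).symm.mp
      ((PySem.Chars.isIn_iff_infix _ _).mpr hinf) with ⟨a, ha⟩
    rw [dd] at ha
    rcases Nat.eq_zero_or_pos a with rfl | hpos
    · exact hm (drop_cast s k (by omega) ha)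
    · apply h
      apply (PySem.Chars.isIn_iff_infix _ _).mp
      apply (PySem.Chars.exists_prefix_drop_iff_isIn k (s.drop (i+1))).mp
      exact ⟨a - 1, by rw [dd]; exact drop_cast s k (by omega) ha⟩
  · have hnn : 0 ≤ PySem.Chars.find (s.drop (i+1)) k := by
      have := PySem.Chars.neg_one_le_find (s.drop (i+1)) k
      omega
    obtain ⟨hp', hmin'⟩ := PySem.Chars.find_spec hnn
    set j := (PySem.Chars.find (s.drop (i+1)) k).toNat with hj
    have hfj : PySem.Chars.find (s.drop (i+1)) k = (j : Int) := by omega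
    rw [hfj]
    have : (1 : Int) + (j : Int) = ((1 + j : Nat) : Int) := by push_cast; ring
    rw [this]
    apply find_first_unique
    · rw [dd]
      rw [dd] at hp'
      exact drop_cast s k (by omega) hp'
    · intro a ha
      rw [dd]
      rcases Nat.eq_zero_or_pos a with rfl | hpos
      · exact fun hpre => hm (drop_cast s k (by omega) hpre)
      · intro hpre
        apply hmin' (a - 1) (by omega)
        rw [dd]
        exact drop_cast s k (by omega) hpre

theorem searchWhile_eq (k v : String) (hk : k.toList ≠ []) (s : List Char) :
    ∀ fuel (c : Nat) (sc : String), sc.toList = s.drop c → ∀ acc,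
      searchWhile k v fuel sc (c : Int) acc
        = acc ++ (J s k.toList fuel c).map (fun (p : Nat) => ((p : Int), v)) := by
  intro fuel
  induction fuel with
  | zero => intro c sc hsc acc; simp [searchWhile, J]
  | succ fuel ih =>
    intro c sc hsc acc
    have hfind : PySem.Str.find sc k = PySem.Chars.find (s.drop c) k.toList := by
      rw [PySem.Str.find_eq, hsc]
    rw [searchWhile, J_step]
    simp only [hfind]
    split_ifs with hf
    · simp
    · obtain ⟨hnn, hpre, hle⟩ := find_head_facts s k.toList hk c hf
      set j := (PySem.Chars.find (s.drop c) k.toList).toNat with hj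
      have hfj : PySem.Chars.find (s.drop c) k.toList = (j : Int) := by omega
      have hkl : 1 ≤ k.toList.length := by
        cases h : k.toList with
        | nil => exact absurd h hk
        | cons a t => simp
      have hsclen : sc.toList.length = s.length - c := by rw [hsc, List.length_drop]
      have hcn : c ≤ s.length := by omega
      have hjk : j + k.toList.length ≤ sc.toList.length := by omega
      -- new string copy
      have hsc' : (PySem.Str.slice sc (some (PySem.Chars.find (s.drop c) k.toList + PySem.Str.len k))
          (some (PySem.Str.len sc))).toList = s.drop (c + j + k.toList.length) := by
        rw [PySem.Str.toList_slice, PySem.Chars.slice_eq_listSlice, hfj, PySem.Str.len_eq,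
          PySem.Str.len_eq, PySem.List.slice_toNat _ (by positivity) (by positivity)]
        have h1 : ((j : Int) + (k.toList.length : Int)).toNat = j + k.toList.length := by omega
        have h2 : ((sc.toList.length : Int)).toNat = sc.toList.length := by omega
        rw [h1, h2, hsc, dd]
        have h3 : c + (j + k.toList.length) = c + j + k.toList.length := by omega
        rw [h3]
        apply List.take_of_length_le
        have hdl : (List.drop c s).length = s.length - c := by rw [List.length_drop]
        rw [List.length_drop]
        omega
      -- cut_char increment
      have hcut : (c : Int) + PySem.Str.len (PySem.Str.slice sc (some 0)
          (some (PySem.Chars.find (s.drop c) k.toList + PySem.Str.len k)))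
          = ((c + j + k.toList.length : Nat) : Int) := by
        rw [PySem.Str.len_eq, PySem.Str.toList_slice, PySem.Chars.slice_eq_listSlice, hfj,
          PySem.Str.len_eq, PySem.List.slice_toNat _ (by omega) (by positivity)]
        simp only [Int.toNat_zero, List.drop_zero]
        rw [List.length_take]
        have h1 : ((j : Int) + (k.toList.length : Int)).toNat = j + k.toList.length := by omega
        rw [h1]
        omega
      rw [hcut]
      have hpair : (c : Int) + PySem.Chars.find (s.drop c) k.toList = ((c + j : Nat) : Int) := by
        rw [hfj]; push_cast; ring
      rw [hpair]
      rw [ih (c + j + k.toList.length) _ hsc' (acc ++ [(((c + j : Nat) : Int), v)])]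
      simp [List.append_assoc]

def LA (s : List Char) (es : List (String × String)) : List (Int × String) :=
  es.flatMap (fun kv => (Jc s kv.1.toList 0).map (fun (p : Nat) => ((p : Int), kv.2)))

theorem foldl_searchWhile (string : String) :
    ∀ (es : List (String × String)), (∀ kv ∈ es, kv.1 ≠ "") → ∀ acc,
      es.foldl (fun search_result kv =>
          searchWhile kv.1 kv.2 (string.toList.length + 1) string 0 search_result) acc
        = acc ++ LA string.toList es := by
  intro es
  induction es with
  | nil => intro _ acc; simp [LA]
  | cons e rest ih =>
    intro h1 acc
    have hk : e.1.toList ≠ [] := by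
      intro h
      exact h1 e (by simp) (by
        have := congrArg String.ofList h
        simpa using this)
    simp only [List.foldl_cons]
    have hsw := searchWhile_eq e.1 e.2 hk string.toList (string.toList.length + 1) 0 string
      (by simp) acc
    simp only [Nat.cast_zero] at hsw
    rw [hsw]
    rw [ih (fun kv hkv => h1 kv (by simp [hkv])) _]
    simp [LA, Jc, List.append_assoc]

theorem search_eq_LA (string : String) (search_dict : List (String × String))
    (h1 : ∀ kv ∈ search_dict, kv.1 ≠ "") :
    search string search_dict
      = parse_string (PySem.List.sorted (LA string.toList search_dict) (fun x => x.1) false) := by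
  unfold search
  rw [foldl_searchWhile string search_dict h1 []]
  simp

def cur (s k : List Char) : List Nat → Nat → Nat
  | [], na => na
  | i :: rest, na => cur s k rest (if na ≤ i ∧ k <+: s.drop i then i + k.length else na)

def scanKey (s k : List Char) : List Nat → Nat → List Nat
  | [], _ => []
  | i :: rest, na =>
    if na ≤ i ∧ k <+: s.drop i then i :: scanKey s k rest (i + k.length) else scanKey s k rest na

def selB (s k : List Char) (i : Nat) : Bool :=
  decide (cur s k (List.range i) 0 ≤ i ∧ k <+: s.drop i)

theorem cur_append (s k : List Char) (l1 l2 : List Nat) (na : Nat) :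
    cur s k (l1 ++ l2) na = cur s k l2 (cur s k l1 na) := by
  induction l1 generalizing na with
  | nil => simp [cur]
  | cons i rest ih => simp only [List.cons_append, cur]; rw [ih]

theorem scanKey_append (s k : List Char) (l1 l2 : List Nat) (na : Nat) :
    scanKey s k (l1 ++ l2) na = scanKey s k l1 na ++ scanKey s k l2 (cur s k l1 na) := by
  induction l1 generalizing na with
  | nil => simp [scanKey, cur]
  | cons i rest ih =>
    simp only [List.cons_append, scanKey, cur]
    split_ifs <;> simp [ih]

theorem mem_scanKey (s k : List Char) : ∀ l na p, p ∈ scanKey s k l na → p ∈ l := by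
  intro l
  induction l with
  | nil => intro na p hp; simp [scanKey] at hp
  | cons i rest ih =>
    intro na p hp
    simp only [scanKey] at hp
    split_ifs at hp with h
    · rcases List.mem_cons.mp hp with rfl | hp'
      · simp
      · simp [ih _ _ hp']
    · simp [ih _ _ hp]

theorem scanKey_range' (s k : List Char) (hk : k ≠ []) :
    ∀ m i na, i + m = s.length → scanKey s k (List.range' i m) na = Jc s k (max na i) := by
  intro m
  have hkl : 1 ≤ k.length := by
    cases h : k with
    | nil => exact absurd h hk
    | cons a t => simp
  induction m with
  | zero =>
    intro i na h
    rw [show List.range' i 0 = [] from rfl]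
    rw [Jc_nil_of_ge s k hk _ (by omega)]
    rfl
  | succ m ih =>
    intro i na h
    rw [List.range'_succ]
    simp only [scanKey]
    split_ifs with hcond
    · rw [ih (i+1) (i + k.length) (by omega)]
      have hmax1 : max (i + k.length) (i + 1) = i + k.length := by omega
      have hmax2 : max na i = i := by omega
      rw [hmax1, hmax2]
      have hfind : PySem.Chars.find (s.drop i) k = ((0 : Nat) : Int) := by
        apply find_first_unique
        · rw [dd]
          have h0 : i + 0 = i := by omega
          rw [h0]
          exact hcond.2
        · intro a ha; omega
      rw [Jc_unfold s k hk i]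
      simp only [hfind]
      norm_num
    · rw [ih (i+1) na (by omega)]
      rcases Nat.lt_or_ge i na with hna | hna
      · have hmax1 : max na i = na := by omega
        have hmax2 : max na (i+1) = na := by omega
        rw [hmax1, hmax2]
      · have hnomatch : ¬ k <+: s.drop i := fun hp => hcond ⟨hna, hp⟩
        have hmax1 : max na i = i := by omega
        have hmax2 : max na (i+1) = i + 1 := by omega
        rw [hmax1, hmax2]
        rw [Jc_unfold s k hk i, Jc_unfold s k hk (i+1)]
        simp only [find_drop_succ s k i hnomatch]
        have hnn := PySem.Chars.neg_one_le_find (s.drop (i+1)) k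
        split_ifs with h2 h3
        all_goals first
          | rfl
          | omega
          | (rw [show i + 1 + (PySem.Chars.find (s.drop (i+1)) k).toNat
                = i + (1 + PySem.Chars.find (s.drop (i+1)) k).toNat from by omega])

theorem selB_iff_mem_Jc (s k : List Char) (hk : k ≠ []) (i : Nat) (hi : i < s.length) :
    selB s k i = true ↔ i ∈ Jc s k 0 := by
  unfold selB
  rw [decide_eq_true_eq]
  have hsplit : List.range s.length = List.range' 0 i ++ List.range' i (s.length - i) := by
    rw [List.range_eq_range']
    have h4 := List.range'_append (s := 0) (m := i) (n := s.length - i) (step := 1)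
    simp only [Nat.zero_add, Nat.one_mul] at h4
    rw [h4]
    congr 1
    omega
  have hJ0 : Jc s k 0 = scanKey s k (List.range s.length) 0 := by
    rw [List.range_eq_range', scanKey_range' s k hk s.length 0 0 (by omega)]
    simp
  rw [hJ0, hsplit, scanKey_append]
  have hr0 : List.range' 0 i = List.range i := List.range_eq_range'.symm
  rw [hr0]
  set na := cur s k (List.range i) 0 with hna
  have hmem1 : i ∉ scanKey s k (List.range i) 0 := by
    intro hmem
    have := mem_scanKey s k _ _ _ hmem
    simp [List.mem_range] at this
  obtain ⟨m, hm⟩ : ∃ m, s.length - i = m + 1 := ⟨s.length - i - 1, by omega⟩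
  have hrest : List.range' i (s.length - i) = i :: List.range' (i+1) m := by
    rw [hm, List.range'_succ]
  rw [hrest]
  simp only [scanKey]
  constructor
  · intro hsel
    have : na ≤ i ∧ k <+: s.drop i := hsel
    rw [if_pos this]
    simp
  · intro hmem
    rcases List.mem_append.mp hmem with h1 | h2
    · exact absurd h1 hmem1
    · split_ifs at h2 with hcond
      · rcases List.mem_cons.mp h2 with _ | h3
        · exact hcond
        · have := mem_scanKey s k _ _ _ h3
          simp [List.mem_range'] at this
          omega
      · have := mem_scanKey s k _ _ _ h2
        simp [List.mem_range'] at this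
        omega

def LB (s : List Char) (es : List (String × String)) : List (Int × String) :=
  (List.range s.length).flatMap (fun i =>
    es.flatMap (fun kv => if selB s kv.1.toList i then [((i : Int), kv.2)] else []))

theorem foldl_str (l : List (Int × String)) :
    ∀ r : String, l.foldl (fun a p => a ++ p.2) r = r ++ parse_string l := by
  induction l with
  | nil => intro r; simp [parse_string]
  | cons p rest ih =>
    intro r
    simp only [List.foldl_cons, parse_string] at *
    rw [ih (r ++ p.2), ih ("" ++ p.2), String.empty_append, String.append_assoc]

theorem parse_append (l1 l2 : List (Int × String)) :
    parse_string (l1 ++ l2) = parse_string l1 ++ parse_string l2 := by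
  unfold parse_string
  rw [List.foldl_append, foldl_str, foldl_str, foldl_str, String.empty_append]
  rw [String.empty_append]

def innerStep (string : String) (i : Int) (st : PySem.Dict String Int × String)
    (kv : String × String) : PySem.Dict String Int × String :=
  if st.1.getD kv.1 0 ≤ i ∧ PySem.Str.slice string (some i) (some (i + PySem.Str.len kv.1)) = kv.1 then
    (st.1.insert kv.1 (i + PySem.Str.len kv.1), st.2 ++ kv.2)
  else st

def condB (string : String) (i : Int) (d : PySem.Dict String Int) (kv : String × String) : Bool :=
  decide (d.getD kv.1 0 ≤ i ∧ PySem.Str.slice string (some i) (some (i + PySem.Str.len kv.1)) = kv.1)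

theorem innerStep_eq (string : String) (i : Int) (d : PySem.Dict String Int) (res : String)
    (e : String × String) :
    innerStep string i (d, res) e
      = if condB string i d e then (d.insert e.1 (i + PySem.Str.len e.1), res ++ e.2) else (d, res) := by
  unfold innerStep condB
  by_cases h : (d.getD e.1 0 ≤ i ∧ PySem.Str.slice string (some i) (some (i + PySem.Str.len e.1)) = e.1)
  · rw [if_pos h, if_pos (decide_eq_true h)]
  · rw [if_neg h, if_neg (by simpa using h)]

theorem slice_eq_iff_prefix (string : String) (kv1 : String) (iN : Nat) :
    PySem.Str.slice string (some (iN : Int)) (some ((iN : Int) + PySem.Str.len kv1)) = kv1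
      ↔ kv1.toList <+: string.toList.drop iN := by
  rw [PySem.Str.len_eq, ← String.toList_inj, PySem.Str.toList_slice, PySem.Chars.slice_eq_listSlice,
    PySem.List.slice_natCast_add]
  rw [List.prefix_iff_eq_take]
  constructor
  · intro h
    rw [← h, List.length_take, ← List.take_eq_take_min]
  · intro h
    exact h.symm

theorem inner_fst_not_mem (string : String) (i : Int) :
    ∀ (es : List (String × String)) (d : PySem.Dict String Int) (res : String) (k' : String),
      k' ∉ es.map (·.1) →
      ((es.foldl (innerStep string i) (d, res)).1).getD k' 0 = d.getD k' 0 := by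
  intro es
  induction es with
  | nil => intro d res k' _; rfl
  | cons e rest ih =>
    intro d res k' hk'
    simp only [List.map_cons, List.mem_cons, not_or] at hk'
    simp only [List.foldl_cons]
    have hstep := innerStep_eq string i d res e
    rw [hstep]
    split_ifs with hc
    · rw [ih _ _ _ hk'.2, PySem.Dict.getD_insert]
      simp [hk'.1]
    · exact ih _ _ _ hk'.2

theorem inner_fst_mem (string : String) (i : Int) :
    ∀ (es : List (String × String)) (d : PySem.Dict String Int) (res : String)
      (kv : String × String), kv ∈ es → (es.map (·.1)).Nodup →
      ((es.foldl (innerStep string i) (d, res)).1).getD kv.1 0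
        = if condB string i d kv then i + PySem.Str.len kv.1 else d.getD kv.1 0 := by
  intro es
  induction es with
  | nil => intro d res kv h; simp at h
  | cons e rest ih =>
    intro d res kv hmem hnd
    simp only [List.map_cons, List.nodup_cons] at hnd
    rcases List.mem_cons.mp hmem with rfl | hmem'
    · simp only [List.foldl_cons]
      have hstep := innerStep_eq string i d res kv
      rw [hstep]
      have hni : kv.1 ∉ rest.map (·.1) := hnd.1
      split_ifs with hc
      · rw [inner_fst_not_mem string i rest _ _ _ hni, PySem.Dict.getD_insert]
        simp
      · rw [inner_fst_not_mem string i rest _ _ _ hni]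
    · simp only [List.foldl_cons]
      have hstep := innerStep_eq string i d res e
      rw [hstep]
      have hne : kv.1 ≠ e.1 := by
        intro h
        exact hnd.1 (h ▸ (List.mem_map.mpr ⟨kv, hmem', rfl⟩))
      by_cases hc : condB string i d e
      · rw [if_pos hc, ih _ _ kv hmem' hnd.2]
        have hgd : (d.insert e.1 (i + PySem.Str.len e.1)).getD kv.1 0 = d.getD kv.1 0 := by
          rw [PySem.Dict.getD_insert]; simp [hne]
        have hcond : condB string i (d.insert e.1 (i + PySem.Str.len e.1)) kv ↔ condB string i d kv := by
          unfold condB; rw [hgd]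
        exact if_congr hcond rfl hgd
      · rw [if_neg hc, ih _ _ kv hmem' hnd.2]

theorem inner_snd (string : String) (i : Int) :
    ∀ (es : List (String × String)) (d : PySem.Dict String Int) (res : String),
      (es.map (·.1)).Nodup →
      (es.foldl (innerStep string i) (d, res)).2
        = res ++ parse_string (es.flatMap (fun kv =>
            if condB string i d kv then [(i, kv.2)] else [])) := by
  intro es
  induction es with
  | nil =>
    intro d res _
    show res = res ++ parse_string []
    rw [show parse_string [] = "" from rfl, String.append_empty]
  | cons e rest ih =>
    intro d res hnd
    simp only [List.map_cons, List.nodup_cons] at hnd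
    simp only [List.foldl_cons, List.flatMap_cons]
    have hstep := innerStep_eq string i d res e
    rw [hstep]
    split_ifs with hc
    · rw [ih _ _ hnd.2]
      have hcong : rest.flatMap (fun kv =>
            if condB string i (d.insert e.1 (i + PySem.Str.len e.1)) kv then [(i, kv.2)] else [])
          = rest.flatMap (fun kv => if condB string i d kv then [(i, kv.2)] else []) := by
        apply List.flatMap_congr
        intro kv hkv
        have hne : kv.1 ≠ e.1 := by
          intro h
          exact hnd.1 (h ▸ (List.mem_map.mpr ⟨kv, hkv, rfl⟩))
        have hgd : (d.insert e.1 (i + PySem.Str.len e.1)).getD kv.1 0 = d.getD kv.1 0 := by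
          rw [PySem.Dict.getD_insert]; simp [hne]
        have hcond : condB string i (d.insert e.1 (i + PySem.Str.len e.1)) kv
            ↔ condB string i d kv := by
          unfold condB; rw [hgd]
        exact if_congr hcond rfl rfl
      rw [hcong, parse_append]
      have h1 : parse_string [(i, e.2)] = "" ++ e.2 := rfl
      rw [h1, String.empty_append, String.append_assoc]
    · rw [ih _ _ hnd.2, List.nil_append]



theorem condB_iff_selB (string : String) (es : List (String × String))
    (dm : PySem.Dict String Int) (m : Nat)
    (hinv : ∀ kv ∈ es, dm.getD kv.1 0 = (cur string.toList kv.1.toList (List.range m) 0 : Int)) :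
    ∀ kv ∈ es, condB string (m : Int) dm kv ↔ selB string.toList kv.1.toList m := by
  intro kv hkv
  unfold condB selB
  rw [decide_eq_true_eq, decide_eq_true_eq]
  rw [hinv kv hkv, slice_eq_iff_prefix string kv.1 m, Nat.cast_le]

theorem outer_loop (string : String) (es : List (String × String))
    (hnd : (es.map (·.1)).Nodup) :
    ∀ m, m ≤ string.toList.length →
      ∃ dm, (∀ kv ∈ es, dm.getD kv.1 0 = (cur string.toList kv.1.toList (List.range m) 0 : Int)) ∧
        (List.range m).foldl
          (fun st (iN : Nat) => es.foldl (innerStep string (iN : Int)) st) (PySem.Dict.empty, "")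
          = (dm, parse_string ((List.range m).flatMap (fun i =>
              es.flatMap (fun kv =>
                if selB string.toList kv.1.toList i then [((i : Int), kv.2)] else [])))) := by
  intro m
  induction m with
  | zero =>
    intro _
    refine ⟨PySem.Dict.empty, ?_, ?_⟩
    · intro kv _
      show (PySem.Dict.empty.get? kv.1).getD 0 = _
      simp [PySem.Dict.empty, PySem.Dict.get?, cur]
    · rfl
  | succ m ih =>
    intro hm
    obtain ⟨dm, hinv, heq⟩ := ih (by omega)
    have hcond := condB_iff_selB string es dm m hinv
    refine ⟨(es.foldl (innerStep string (m : Int)) (dm,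
      parse_string ((List.range m).flatMap (fun i => es.flatMap (fun kv =>
        if selB string.toList kv.1.toList i then [((i : Int), kv.2)] else []))))).1, ?_, ?_⟩
    · intro kv hkv
      rw [inner_fst_mem string (m : Int) es _ _ kv hkv hnd]
      rw [List.range_succ, cur_append]
      have hcur : cur string.toList kv.1.toList [m] (cur string.toList kv.1.toList (List.range m) 0)
          = if cur string.toList kv.1.toList (List.range m) 0 ≤ m ∧ kv.1.toList <+: string.toList.drop m
            then m + kv.1.toList.length else cur string.toList kv.1.toList (List.range m) 0 := rfl
      rw [hcur]
      by_cases hs : selB string.toList kv.1.toList m = true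
      · have hs' : cur string.toList kv.1.toList (List.range m) 0 ≤ m
            ∧ kv.1.toList <+: string.toList.drop m := by
          have h' := hs
          unfold selB at h'
          exact of_decide_eq_true h'
        rw [if_pos ((hcond kv hkv).mpr hs), if_pos hs']
        rw [PySem.Str.len_eq]
        push_cast
        ring
      · have hs' : ¬ (cur string.toList kv.1.toList (List.range m) 0 ≤ m
            ∧ kv.1.toList <+: string.toList.drop m) := by
          intro hcontra
          exact hs (by unfold selB; exact decide_eq_true hcontra)
        rw [if_neg (fun hc => hs ((hcond kv hkv).mp hc)), if_neg hs', hinv kv hkv]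
    · rw [List.range_succ, List.foldl_append, heq]
      simp only [List.foldl_cons, List.foldl_nil]
      have hsnd := inner_snd string (m : Int) es dm
        (parse_string ((List.range m).flatMap (fun i => es.flatMap (fun kv =>
          if selB string.toList kv.1.toList i then [((i : Int), kv.2)] else [])))) hnd
      have hcond := condB_iff_selB string es dm m hinv
      have hblock : es.flatMap (fun kv => if condB string (m : Int) dm kv then [((m : Int), kv.2)] else [])
          = es.flatMap (fun kv => if selB string.toList kv.1.toList m then [(((m : Nat) : Int), kv.2)] else []) := by
        apply List.flatMap_congr
        intro kv hkv
        exact if_congr (hcond kv hkv) rfl rfl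
      rw [hblock] at hsnd
      rw [List.flatMap_append, parse_append]
      simp only [List.flatMap_cons, List.flatMap_nil, List.append_nil]
      exact Prod.ext rfl hsnd

theorem search_alt_eq_LB (string : String) (search_dict : List (String × String))
    (hnd : (search_dict.map (·.1)).Nodup) :
    search_alt string search_dict = parse_string (LB string.toList search_dict) := by
  have h0 : search_alt string search_dict
      = ((PySem.List.pyRange 0 (PySem.Str.len string) 1).foldl
          (fun st i => search_dict.foldl (innerStep string i) st) (PySem.Dict.empty, "")).2 := rfl
  rw [h0, PySem.Str.len_eq, PySem.List.pyRange_zero_natCast, List.foldl_map]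
  obtain ⟨dm, -, heq⟩ := outer_loop string search_dict hnd string.toList.length (le_refl _)
  rw [heq]
  rfl

theorem Jc_nodup (s k : List Char) (hk : k ≠ []) (c : Nat) : (Jc s k c).Nodup :=
  (J_pairwise s k hk (s.length + 1) c).imp (fun h => Nat.ne_of_lt h)

theorem map_filter_singleton (v : String) (i : Nat) :
    ∀ l : List Nat, l.Nodup →
      (l.map (fun (p : Nat) => ((p : Int), v))).filter (fun x => decide (x.1 = (i : Int)))
        = if i ∈ l then [((i : Int), v)] else [] := by
  intro l
  induction l with
  | nil => intro _; simp
  | cons p rest ih =>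
    intro hnd
    simp only [List.nodup_cons] at hnd
    simp only [List.map_cons, List.filter_cons]
    by_cases hpi : p = i
    · subst hpi
      have ht : (decide (((p : Nat) : Int) = ((p : Nat) : Int))) = true := by simp
      rw [ht, if_pos rfl, ih hnd.2, if_neg hnd.1, if_pos (List.mem_cons_self)]
    · have hd : (decide (((p : Nat) : Int) = (i : Int))) = false := by
        simp [Nat.cast_inj]
        omega
      rw [hd, if_neg (Bool.false_ne_true), ih hnd.2]
      by_cases hmem : i ∈ rest
      · rw [if_pos hmem, if_pos (List.mem_cons.mpr (Or.inr hmem))]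
      · rw [if_neg hmem, if_neg (by
          intro hmm
          rcases List.mem_cons.mp hmm with h | h
          · exact hpi h.symm
          · exact hmem h)]

theorem filter_const_fst (q c : Int) :
    ∀ bl : List (Int × String), (∀ x ∈ bl, x.1 = c) →
      bl.filter (fun x => decide (x.1 = q)) = if c = q then bl else [] := by
  intro bl
  induction bl with
  | nil => intro _; simp
  | cons x rest ih =>
    intro hall
    have hx : x.1 = c := hall x (by simp)
    simp only [List.filter_cons]
    rw [ih (fun y hy => hall y (by simp [hy]))]
    by_cases hcq : c = q
    · subst hcq
      simp [hx]
    · simp [hx, hcq]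

theorem flatMap_pick {β : Type} (g : Nat → List β) (i : Nat) :
    ∀ l : List Nat, l.Nodup →
      l.flatMap (fun j => if j = i then g j else []) = if i ∈ l then g i else [] := by
  intro l
  induction l with
  | nil => intro _; simp
  | cons j rest ih =>
    intro hnd
    simp only [List.nodup_cons] at hnd
    simp only [List.flatMap_cons]
    by_cases hji : j = i
    · subst hji
      rw [if_pos rfl, ih hnd.2, if_neg hnd.1, if_pos (List.mem_cons_self)]
      simp
    · rw [if_neg hji, ih hnd.2]
      by_cases hmem : i ∈ rest
      · rw [if_pos hmem, if_pos (List.mem_cons.mpr (Or.inr hmem))]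
        simp
      · rw [if_neg hmem, if_neg (by
          intro hmm
          rcases List.mem_cons.mp hmm with h | h
          · exact hji h.symm
          · exact hmem h)]
        simp

theorem mem_block_fst (s : List Char) (es : List (String × String)) (j : Nat) :
    ∀ x ∈ es.flatMap (fun kv => if selB s kv.1.toList j then [((j : Int), kv.2)] else []),
      x.1 = (j : Int) := by
  intro x hx
  rcases List.mem_flatMap.mp hx with ⟨kv, _, hxin⟩
  split_ifs at hxin with h
  · rcases List.mem_singleton.mp hxin with rfl
    rfl
  · simp at hxin

theorem pairwise_const_fst (c : Int) :
    ∀ bl : List (Int × String), (∀ x ∈ bl, x.1 = c) → bl.Pairwise (fun a b => a.1 ≤ b.1) := by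
  intro bl
  induction bl with
  | nil => intro _; simp
  | cons x rest ih =>
    intro hall
    refine List.Pairwise.cons ?_ (ih (fun y hy => hall y (by simp [hy])))
    intro y hy
    rw [hall x (by simp), hall y (by simp [hy])]

theorem LB_pairwise (s : List Char) (es : List (String × String)) :
    (LB s es).Pairwise (fun a b => a.1 ≤ b.1) := by
  unfold LB
  suffices h : ∀ n : Nat, ((List.range n).flatMap (fun i =>
      es.flatMap (fun kv => if selB s kv.1.toList i then [((i : Int), kv.2)] else []))).Pairwise
        (fun a b => a.1 ≤ b.1) from h s.length
  intro n
  induction n with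
  | zero => simp
  | succ n ih =>
    rw [List.range_succ, List.flatMap_append]
    rw [List.pairwise_append]
    refine ⟨ih, ?_, ?_⟩
    · simp only [List.flatMap_cons, List.flatMap_nil, List.append_nil]
      exact pairwise_const_fst ((n : Int)) _ (mem_block_fst s es n)
    · intro a ha b hb
      simp only [List.flatMap_cons, List.flatMap_nil, List.append_nil] at hb
      rcases List.mem_flatMap.mp ha with ⟨j, hj, hain⟩
      rw [mem_block_fst s es j a hain, mem_block_fst s es n b hb]
      simp only [List.mem_range] at hj
      exact_mod_cast Nat.le_of_lt hj

theorem filter_LA (s : List Char) (es : List (String × String)) (h1 : ∀ kv ∈ es, kv.1 ≠ "")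
    (q : Int) :
    (LA s es).filter (fun x => decide (x.1 = q))
      = (LB s es).filter (fun x => decide (x.1 = q)) := by
  have hk : ∀ kv ∈ es, kv.1.toList ≠ [] := by
    intro kv hkv h
    exact h1 kv hkv (by
      have := congrArg String.ofList h
      simpa using this)
  unfold LA LB
  rw [List.filter_flatMap, List.filter_flatMap]
  by_cases hq : ∃ i : Nat, q = (i : Int) ∧ i < s.length
  · obtain ⟨i, hqi, hi⟩ := hq
    subst hqi
    have hlhs : es.flatMap (fun kv =>
          ((Jc s kv.1.toList 0).map (fun (p : Nat) => ((p : Int), kv.2))).filter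
            (fun x => decide (x.1 = (i : Int))))
        = es.flatMap (fun kv => if i ∈ Jc s kv.1.toList 0 then [((i : Int), kv.2)] else []) := by
      apply List.flatMap_congr
      intro kv hkv
      exact map_filter_singleton kv.2 i (Jc s kv.1.toList 0) (Jc_nodup s kv.1.toList (hk kv hkv) 0)
    have hrhs : (List.range s.length).flatMap (fun j =>
          (es.flatMap (fun kv => if selB s kv.1.toList j then [((j : Int), kv.2)] else [])).filter
            (fun x => decide (x.1 = (i : Int))))
        = (List.range s.length).flatMap (fun j => if j = i then
            es.flatMap (fun kv => if selB s kv.1.toList j then [((j : Int), kv.2)] else []) else []) := by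
      apply List.flatMap_congr
      intro j _
      rw [filter_const_fst (i : Int) (j : Int) _ (mem_block_fst s es j)]
      exact if_congr (by exact_mod_cast Nat.cast_inj) rfl rfl
    rw [hlhs, hrhs, flatMap_pick _ i (List.range s.length) (List.nodup_range),
      if_pos (List.mem_range.mpr hi)]
    apply List.flatMap_congr
    intro kv hkv
    exact if_congr (selB_iff_mem_Jc s kv.1.toList (hk kv hkv) i hi).symm rfl rfl
  · have hlhs : ∀ kv ∈ es, ((Jc s kv.1.toList 0).map (fun (p : Nat) => ((p : Int), kv.2))).filter
        (fun x => decide (x.1 = q)) = [] := by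
      intro kv hkv
      apply List.filter_eq_nil_iff.mpr
      intro x hxin
      rcases List.mem_map.mp hxin with ⟨p, hp, rfl⟩
      obtain ⟨-, hpb, -⟩ := J_mem_bounds s kv.1.toList (hk kv hkv) (s.length + 1) 0 p hp
      have hkl : 1 ≤ kv.1.toList.length := by
        cases hcs : kv.1.toList with
        | nil => exact absurd hcs (hk kv hkv)
        | cons a t => simp
      simp only [decide_eq_true_eq]
      intro hxq
      exact hq ⟨p, hxq.symm, by omega⟩
    have hrhs : ∀ j ∈ List.range s.length,
        (es.flatMap (fun kv => if selB s kv.1.toList j then [((j : Int), kv.2)] else [])).filter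
          (fun x => decide (x.1 = q)) = [] := by
      intro j hj
      apply List.filter_eq_nil_iff.mpr
      intro x hxin
      rw [mem_block_fst s es j x hxin]
      simp only [decide_eq_true_eq]
      intro hxq
      exact hq ⟨j, hxq.symm, List.mem_range.mp hj⟩
    calc es.flatMap (fun kv => ((Jc s kv.1.toList 0).map (fun (p : Nat) => ((p : Int), kv.2))).filter
            (fun x => decide (x.1 = q)))
        = es.flatMap (fun _ => ([] : List (Int × String))) := List.flatMap_congr hlhs
      _ = [] := by simp
      _ = (List.range s.length).flatMap (fun _ => ([] : List (Int × String))) := by simp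
      _ = _ := (List.flatMap_congr hrhs).symm

theorem insertBy_nil {α : Type} (b : α → α → Bool) (x : α) :
    PySem.List.insertBy b x [] = [x] := rfl

theorem insertBy_cons {α : Type} (b : α → α → Bool) (x y : α) (t : List α) :
    PySem.List.insertBy b x (y :: t) = if b x y then x :: y :: t else y :: PySem.List.insertBy b x t := rfl

theorem filter_insertBy {α : Type} (f : α → Int) (x : α) (v : Int) :
    ∀ ys : List α, ys.Pairwise (fun a b => f a ≤ f b) →
      (PySem.List.insertBy (fun a b => decide (f a < f b)) x ys).filter (fun a => decide (f a = v))
        = ys.filter (fun a => decide (f a = v)) ++ (if f x = v then [x] else []) := by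
  intro ys
  induction ys with
  | nil =>
    intro _
    rw [insertBy_nil]
    by_cases h : f x = v
    · rw [if_pos h]; simp [h]
    · rw [if_neg h]; simp [h]
  | cons y t ih =>
    intro hp
    rcases List.pairwise_cons.mp hp with ⟨hy, ht⟩
    rw [insertBy_cons]
    by_cases hlt : f x < f y
    · rw [if_pos (by simpa using hlt)]
      by_cases hv : f x = v
      · have hnone : (y :: t).filter (fun a => decide (f a = v)) = [] := by
          apply List.filter_eq_nil_iff.mpr
          intro a ha
          have : f y ≤ f a := by
            rcases List.mem_cons.mp ha with rfl | ha'
            · exact le_refl _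
            · exact hy a ha'
          simp only [decide_eq_true_eq]
          omega
        rw [List.filter_cons_of_pos (by simp [hv]), hnone, if_pos hv]
        rfl
      · rw [List.filter_cons_of_neg (by simp [hv]), if_neg hv, List.append_nil]
    · rw [if_neg (by simpa using hlt)]
      by_cases hyv : f y = v
      · rw [List.filter_cons_of_pos (by simp [hyv]), List.filter_cons_of_pos (by simp [hyv]),
          ih ht, List.cons_append]
      · rw [List.filter_cons_of_neg (by simp [hyv]), List.filter_cons_of_neg (by simp [hyv]),
          ih ht]

theorem insertBy_pairwise {α : Type} (f : α → Int) (x : α) :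
    ∀ ys : List α, ys.Pairwise (fun a b => f a ≤ f b) →
      (PySem.List.insertBy (fun a b => decide (f a < f b)) x ys).Pairwise (fun a b => f a ≤ f b) := by
  intro ys
  induction ys with
  | nil => intro _; rw [insertBy_nil]; simp
  | cons y t ih =>
    intro hp
    rcases List.pairwise_cons.mp hp with ⟨hy, ht⟩
    rw [insertBy_cons]
    by_cases hlt : f x < f y
    · rw [if_pos (by simpa using hlt)]
      refine List.Pairwise.cons ?_ hp
      intro a ha
      rcases List.mem_cons.mp ha with rfl | ha'
      · omega
      · have := hy a ha'
        omega
    · rw [if_neg (by simpa using hlt)]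
      refine List.Pairwise.cons ?_ (ih ht)
      intro a ha
      rcases (PySem.List.mem_insertBy _ _ _ _).mp ha with rfl | ha'
      · omega
      · exact hy a ha'

theorem foldl_insertBy_filter {α : Type} (f : α → Int) (v : Int) :
    ∀ (xs acc : List α), acc.Pairwise (fun a b => f a ≤ f b) →
      ((xs.foldl (fun acc x => PySem.List.insertBy (fun a b => decide (f a < f b)) x acc) acc).filter
          (fun a => decide (f a = v)))
        = acc.filter (fun a => decide (f a = v)) ++ xs.filter (fun a => decide (f a = v)) := by
  intro xs
  induction xs with
  | nil => intro acc _; simp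
  | cons x rest ih =>
    intro acc hp
    simp only [List.foldl_cons]
    rw [ih _ (insertBy_pairwise f x acc hp), filter_insertBy f x v acc hp]
    rw [List.filter_cons]
    by_cases hv : f x = v
    · simp [hv]
    · simp [hv]

theorem sorted_filter {α : Type} (f : α → Int) (xs : List α) (v : Int) :
    (PySem.List.sorted xs f false).filter (fun a => decide (f a = v))
      = xs.filter (fun a => decide (f a = v)) := by
  rw [PySem.List.sorted_eq_foldl_insertBy, foldl_insertBy_filter f v xs [] (by simp)]
  simp

theorem eq_of_pairwise_of_filter_eq {α : Type} (f : α → Int) :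
    ∀ (L1 L2 : List α), L1.Pairwise (fun a b => f a ≤ f b) → L2.Pairwise (fun a b => f a ≤ f b) →
      (∀ v, L1.filter (fun a => decide (f a = v)) = L2.filter (fun a => decide (f a = v))) →
      L1 = L2 := by
  intro L1
  induction L1 with
  | nil =>
    intro L2 _ _ hf
    cases L2 with
    | nil => rfl
    | cons b t2 =>
      have := hf (f b)
      rw [List.filter_cons_of_pos (by simp)] at this
      simp at this
  | cons a t1 ih =>
    intro L2 hp1 hp2 hf
    cases L2 with
    | nil =>
      have := hf (f a)
      rw [List.filter_cons_of_pos (by simp)] at this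
      simp at this
    | cons b t2 =>
      rcases List.pairwise_cons.mp hp1 with ⟨ha, ht1⟩
      rcases List.pairwise_cons.mp hp2 with ⟨hb, ht2⟩
      have hfab : f a = f b := by
        have h1 := hf (f a)
        rw [List.filter_cons_of_pos (by simp)] at h1
        have hmem : a ∈ (b :: t2).filter (fun x => decide (f x = f a)) := by
          rw [← h1]; simp
        have hamem : a ∈ b :: t2 := List.mem_of_mem_filter hmem
        have hba : f b ≤ f a := by
          rcases List.mem_cons.mp hamem with rfl | h'
          · omega
          · exact hb a h'
        have h2 := hf (f b)
        conv at h2 => rhs; rw [List.filter_cons_of_pos (by simp)]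
        have hmem2 : b ∈ (a :: t1).filter (fun x => decide (f x = f b)) := by
          rw [h2]; simp
        have hbmem : b ∈ a :: t1 := List.mem_of_mem_filter hmem2
        have hab : f a ≤ f b := by
          rcases List.mem_cons.mp hbmem with rfl | h'
          · omega
          · exact ha b h'
        omega
      have hfa := hf (f a)
      rw [List.filter_cons_of_pos (by simp), List.filter_cons_of_pos (by simp [hfab])] at hfa
      have hab : a = b := (List.cons.injEq _ _ _ _).mp hfa |>.1
      have htails : ∀ v, t1.filter (fun x => decide (f x = v)) = t2.filter (fun x => decide (f x = v)) := by
        intro v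
        by_cases hv : v = f a
        · subst hv
          exact (List.cons.injEq _ _ _ _).mp hfa |>.2
        · have h3 := hf v
          rw [List.filter_cons_of_neg (by simp; omega),
            List.filter_cons_of_neg (by simp; rw [← hfab]; omega)] at h3
          exact h3
      rw [hab, ih t2 ht1 ht2 htails]

theorem sorted_LA_eq_LB (string : String) (search_dict : List (String × String))
    (h1 : ∀ kv ∈ search_dict, kv.1 ≠ "") :
    PySem.List.sorted (LA string.toList search_dict) (fun x => x.1) false
      = LB string.toList search_dict := by
  apply eq_of_pairwise_of_filter_eq (fun x => x.1)
  · exact PySem.List.sorted_pairwise _ _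
  · exact LB_pairwise _ _
  · intro v
    exact (sorted_filter (fun x => x.1) (LA string.toList search_dict) v).trans
      (filter_LA string.toList search_dict h1 v)
-- ===== VERDICT (by name: the statement is the Claim_ definition above) =====
theorem search_spec : Claim_equal_search := by
  intro string search_dict _hdom hpre
  unfold Spec_search
  rw [search_eq_LA string search_dict hpre.1, sorted_LA_eq_LB string search_dict hpre.1,
    search_alt_eq_LB string search_dict hpre.2]
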